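-- pv_equiv track=rewrite | github.com/dfadeeff/LeetCode_Python | pythonProject/FB/FindMissingRepeatedValues.py | findMissingAndRepeatedValuesMath
-- ===== SOURCE A (Python) =====
-- from typing import List
--
-- def findMissingAndRepeatedValuesMath(grid: List[List[int]]) -> List[int]:
--     # Get grid dimensions
--     n = len(grid)
--     total = n * n
--
--     # Calculate actual sums from grid
--     sum_val = sum(num for row in grid for num in row)
--     sqr_sum = sum(num * num for row in grid for num in row)
--
--     # Calculate differences from expected sums
--     # Expected sum: n(n+1)/2, Expected square sum: n(n+1)(2n+1)/6
--     sum_diff = sum_val - total * (total + 1) // 2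
--     sqr_diff = sqr_sum - total * (total + 1) * (2 * total + 1) // 6
--
--     # Using math: If x is repeated and y is missing
--     # sum_diff = x - y
--     # sqr_diff = x² - y²
--     repeat = (sqr_diff // sum_diff + sum_diff) // 2
--     missing = (sqr_diff // sum_diff - sum_diff) // 2
--
--     return [repeat, missing]
-- ===== SOURCE B (Python) =====
-- from typing import List
--
-- def findMissingAndRepeatedValuesMath(grid: List[List[int]]) -> List[int]:
--     n = len(grid)
--     diff = 0
--     sq_diff = 0
--     # subtract the expected values 1..n*n ...
--     for v in range(1, n * n + 1):
--         diff -= v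
--         sq_diff -= v * v
--     # ... and add what the grid actually contains
--     for row in grid:
--         for num in row:
--             diff += num
--             sq_diff += num * num
--     rep = (sq_diff // diff + diff) // 2
--     return [rep, rep - diff]
-- ===== Notes on version B (the rewrite author's own statement) =====
-- stated objective: alternative
-- what changed: Replaces the generator-expression sums and the closed-form expected totals n2(n2+1)//2 and n2(n2+1)(2n2+1)//6 by a single pair of running differences accumulated with explicit loops (subtracting each expected value 1..n*n, adding each cell), and derives the missing value as rep - diff instead of a second nested floor division. Pre_ excludes exactly the grids whose sum equals the expected total, where both A and B raise ZeroDivisionError.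
import Mathlib
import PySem

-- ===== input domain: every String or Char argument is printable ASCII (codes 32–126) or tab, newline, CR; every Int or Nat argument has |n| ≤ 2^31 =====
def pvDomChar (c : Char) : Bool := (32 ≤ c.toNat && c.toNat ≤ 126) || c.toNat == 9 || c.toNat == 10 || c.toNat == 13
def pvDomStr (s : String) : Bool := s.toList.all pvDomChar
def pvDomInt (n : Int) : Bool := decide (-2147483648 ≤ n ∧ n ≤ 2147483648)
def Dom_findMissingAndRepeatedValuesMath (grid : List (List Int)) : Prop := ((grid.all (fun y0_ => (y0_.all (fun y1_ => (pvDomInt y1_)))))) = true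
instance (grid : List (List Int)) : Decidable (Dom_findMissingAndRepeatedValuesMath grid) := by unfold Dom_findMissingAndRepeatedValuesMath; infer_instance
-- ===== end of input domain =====

-- B accumulates the sum/square-sum differences with explicit loops over the value range and the
-- cells (no closed-form total formulas) and derives missing as rep - diff; same O(n^2) cost.

-- ===== PORT A =====
def findMissingAndRepeatedValuesMath (grid : List (List Int)) : List Int :=
  let n : Int := grid.length
  let total := n * n
  let sumVal := (grid.flatMap (fun row => row)).sum
  let sqrSum := ((grid.flatMap (fun row => row)).map (fun num => num * num)).sum
  let sumDiff := sumVal - PySem.Int.floordiv (total * (total + 1)) 2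
  let sqrDiff := sqrSum - PySem.Int.floordiv (total * (total + 1) * (2 * total + 1)) 6
  let rep := PySem.Int.floordiv (PySem.Int.floordiv sqrDiff sumDiff + sumDiff) 2
  let missing := PySem.Int.floordiv (PySem.Int.floordiv sqrDiff sumDiff - sumDiff) 2
  [rep, missing]

-- ===== PORT B =====
def findMissingAndRepeatedValuesMath_alt (grid : List (List Int)) : List Int :=
  let n : Int := grid.length
  let p1 := (PySem.List.pyRange 1 (n * n + 1) 1).foldl
      (fun (p : Int × Int) v => (p.1 - v, p.2 - v * v)) (0, 0)
  let p2 := grid.foldl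
      (fun p row => row.foldl (fun (p : Int × Int) num => (p.1 + num, p.2 + num * num)) p) p1
  let rep := PySem.Int.floordiv (PySem.Int.floordiv p2.2 p2.1 + p2.1) 2
  [rep, rep - p2.1]

-- ===== PRECONDITION & SPEC =====
-- Pre_ excludes exactly the grids whose cell sum equals the expected total n^2(n^2+1)/2
-- (sum_diff = 0): there both A and B raise ZeroDivisionError.
def Pre_findMissingAndRepeatedValuesMath (grid : List (List Int)) : Prop :=
  (grid.flatMap (fun row => row)).sum * 2 ≠
    ((grid.length : Int) * (grid.length : Int)) * ((grid.length : Int) * (grid.length : Int) + 1)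
instance (grid : List (List Int)) : Decidable (Pre_findMissingAndRepeatedValuesMath grid) := by
  unfold Pre_findMissingAndRepeatedValuesMath; infer_instance

def pvWitness_findMissingAndRepeatedValuesMath : List (List Int) := [[1, 2], [3, 2]]

def Spec_findMissingAndRepeatedValuesMath (grid : List (List Int)) (out : List Int) : Prop := out = findMissingAndRepeatedValuesMath_alt grid
instance (grid : List (List Int)) (out : List Int) : Decidable (Spec_findMissingAndRepeatedValuesMath grid out) := by unfold Spec_findMissingAndRepeatedValuesMath; infer_instance

-- ===== CLAIM (what is proved, stated in full; the proofs are below) =====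
def Claim_equal_findMissingAndRepeatedValuesMath : Prop := ∀ (grid : List (List Int)), Dom_findMissingAndRepeatedValuesMath grid → Pre_findMissingAndRepeatedValuesMath grid → Spec_findMissingAndRepeatedValuesMath grid (findMissingAndRepeatedValuesMath grid)

-- ===== LEMMAS AND PROOFS =====

-- Sum of 1..m, doubled.
lemma pvSumRange (m : Nat) :
    (PySem.List.pyRange 1 ((m : Int) + 1) 1).sum * 2 = (m : Int) * ((m : Int) + 1) := by
  induction m with
  | zero => decide
  | succ k ih =>
    have h : (1 : Int) ≤ (k : Int) + 1 := by omega
    have : ((k + 1 : Nat) : Int) + 1 = ((k : Int) + 1) + 1 := by push_cast; ring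
    rw [this, PySem.List.pyRange_one_succ_right h, List.sum_append]
    simp only [List.sum_cons, List.sum_nil]
    push_cast
    linear_combination ih

-- Sum of squares of 1..m, times six.
lemma pvSqrSumRange (m : Nat) :
    ((PySem.List.pyRange 1 ((m : Int) + 1) 1).map (fun num => num * num)).sum * 6 =
      (m : Int) * ((m : Int) + 1) * (2 * (m : Int) + 1) := by
  induction m with
  | zero => decide
  | succ k ih =>
    have h : (1 : Int) ≤ (k : Int) + 1 := by omega
    have : ((k + 1 : Nat) : Int) + 1 = ((k : Int) + 1) + 1 := by push_cast; ring
    rw [this, PySem.List.pyRange_one_succ_right h, List.map_append, List.sum_append]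
    simp only [List.map_cons, List.map_nil, List.sum_cons, List.sum_nil]
    push_cast
    linear_combination ih

-- A two-accumulator subtracting fold is (init - sum of f).
lemma pvFoldSub (L : List Int) (a b : Int) :
    L.foldl (fun (p : Int × Int) v => (p.1 - v, p.2 - v * v)) (a, b)
      = (a - L.sum, b - (L.map (fun v => v * v)).sum) := by
  induction L generalizing a b with
  | nil => simp
  | cons v L ih =>
    simp only [List.foldl_cons, List.sum_cons, List.map_cons]
    rw [ih, Prod.mk.injEq]
    exact ⟨by ring, by ring⟩

-- A two-accumulator adding fold is (init + sum of f).
lemma pvFoldAdd (L : List Int) (a b : Int) :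
    L.foldl (fun (p : Int × Int) num => (p.1 + num, p.2 + num * num)) (a, b)
      = (a + L.sum, b + (L.map (fun num => num * num)).sum) := by
  induction L generalizing a b with
  | nil => simp
  | cons v L ih =>
    simp only [List.foldl_cons, List.sum_cons, List.map_cons]
    rw [ih, Prod.mk.injEq]
    exact ⟨by ring, by ring⟩

-- ===== VERDICT (by name: the statement is the Claim_ definition above) =====
theorem findMissingAndRepeatedValuesMath_spec : Claim_equal_findMissingAndRepeatedValuesMath := by
  intro grid _ _
  unfold Spec_findMissingAndRepeatedValuesMath
  unfold findMissingAndRepeatedValuesMath findMissingAndRepeatedValuesMath_alt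
  set T : Int := (grid.length : Int) * (grid.length : Int) with hT
  set flat := grid.flatMap (fun row => row) with hflat
  set R := PySem.List.pyRange 1 (T + 1) 1 with hRdef
  have hm : T = ((grid.length * grid.length : Nat) : Int) := by push_cast; rw [hT]
  have hRsum : R.sum * 2 = T * (T + 1) := by
    rw [hRdef, hm]; exact pvSumRange (grid.length * grid.length)
  have hRsqr : (R.map (fun num => num * num)).sum * 6 = T * (T + 1) * (2 * T + 1) := by
    rw [hRdef, hm]; exact pvSqrSumRange (grid.length * grid.length)
  have hfd1 : PySem.Int.floordiv (T * (T + 1)) 2 = R.sum := by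
    rw [← hRsum]
    show (R.sum * 2).fdiv 2 = R.sum
    exact Int.mul_fdiv_cancel _ (by norm_num)
  have hfd2 : PySem.Int.floordiv (T * (T + 1) * (2 * T + 1)) 6
      = (R.map (fun num => num * num)).sum := by
    rw [← hRsqr]
    show ((R.map (fun num => num * num)).sum * 6).fdiv 6 = _
    exact Int.mul_fdiv_cancel _ (by norm_num)
  -- evaluate B's two loops
  have hp1 : R.foldl (fun (p : Int × Int) v => (p.1 - v, p.2 - v * v)) (0, 0)
      = (0 - R.sum, 0 - (R.map (fun v => v * v)).sum) := pvFoldSub R 0 0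
  have hp2 : grid.foldl
      (fun p row => row.foldl (fun (p : Int × Int) num => (p.1 + num, p.2 + num * num)) p)
      (0 - R.sum, 0 - (R.map (fun v => v * v)).sum)
      = (0 - R.sum + flat.sum, 0 - (R.map (fun v => v * v)).sum
          + (flat.map (fun num => num * num)).sum) := by
    rw [hflat, ← List.foldl_flatMap, pvFoldAdd]
  -- the two difference pairs coincide
  have hd : flat.sum - PySem.Int.floordiv (T * (T + 1)) 2 = 0 - R.sum + flat.sum := by
    rw [hfd1]; ring
  have hq : (flat.map (fun num => num * num)).sum
      - PySem.Int.floordiv (T * (T + 1) * (2 * T + 1)) 6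
      = 0 - (R.map (fun v => v * v)).sum + (flat.map (fun num => num * num)).sum := by
    rw [hfd2]; ring
  -- A's missing is B's rep - diff
  have hmis : ∀ s d : Int, PySem.Int.floordiv (s - d) 2 = PySem.Int.floordiv (s + d) 2 - d := by
    intro s d
    have h : s - d = (s + d) + (-d) * 2 := by ring
    show (s - d).fdiv 2 = (s + d).fdiv 2 - d
    rw [h, Int.add_mul_fdiv_right _ _ (by norm_num : (2 : Int) ≠ 0)]
    ring
  simp only []
  rw [hp1, hp2, hd, hq, hmis]
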